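-- pv_equiv track=rewrite | github.com/remy-lc1313/pallcare-billing | pallcare_billing_app.py | calculate_k023_units
-- ===== SOURCE A (Python) =====
-- import math # Import the math library for the ceiling function
--
-- K023_TIME_THRESHOLDS = [20, 46, 76, 106, 136, 166, 196, 226]
--
-- def calculate_k023_units(time_in_minutes):
--     """Calculates K023 units dynamically."""
--     if time_in_minutes < K023_TIME_THRESHOLDS[0]:
--         return 0
--
--     billable_units = 0
--     for i, threshold in enumerate(K023_TIME_THRESHOLDS):
--         if time_in_minutes >= threshold:
--             billable_units = i + 1
--         else:
--             return billable_units
--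
--     last_threshold_units = len(K023_TIME_THRESHOLDS)
--     last_threshold_time = K023_TIME_THRESHOLDS[-1]
--     time_past_table = time_in_minutes - last_threshold_time
--     additional_units = math.ceil(time_past_table / 30.0)
--     return last_threshold_units + additional_units
-- ===== SOURCE B (Python) =====
-- import math
--
-- def calculate_k023_units(time_in_minutes):
--     """Calculates K023 units by closed-form arithmetic instead of scanning the table."""
--     if time_in_minutes < 20:
--         return 0
--     if time_in_minutes <= 226:
--         # thresholds are 20, then 16+30*i for i=1..7: units = 1 + floor((t-16)/30)
--         return 1 + int((time_in_minutes - 16) // 30)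
--     return 8 + math.ceil((time_in_minutes - 226) / 30.0)
-- ===== Notes on version B (the rewrite author's own statement) =====
-- stated objective: simpler
-- what changed: Replaced the enumerate-loop over the threshold table by a three-branch closed-form arithmetic formula (floor division for the in-table range, ceiling division past it).
import Mathlib
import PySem

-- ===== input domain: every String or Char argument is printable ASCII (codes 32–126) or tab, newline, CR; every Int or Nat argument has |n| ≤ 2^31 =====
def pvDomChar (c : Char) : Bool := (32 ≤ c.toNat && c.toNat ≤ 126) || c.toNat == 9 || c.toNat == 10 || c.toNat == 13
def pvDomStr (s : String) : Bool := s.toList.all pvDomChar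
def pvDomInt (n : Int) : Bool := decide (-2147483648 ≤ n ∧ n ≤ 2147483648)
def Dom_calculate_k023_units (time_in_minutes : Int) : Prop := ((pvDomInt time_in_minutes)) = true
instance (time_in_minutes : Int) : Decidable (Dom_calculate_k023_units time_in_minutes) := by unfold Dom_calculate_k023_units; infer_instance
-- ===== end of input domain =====

-- B replaces A's enumerate-loop over the threshold table by a closed-form arithmetic formula (objective: simpler).

-- ===== PORT A =====
def K023_TIME_THRESHOLDS : List Int := [20, 46, 76, 106, 136, 166, 196, 226]

-- the for-loop over enumerate(K023_TIME_THRESHOLDS): `tail` is the value computed after the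
-- loop falls through (it uses no loop state in A); an early `return billable_units` yields `bill`
def k023Loop (t : Int) (tail : Int) : List (Int × Int) → Int → Int
  | [], _ => tail
  | (i, th) :: rest, bill => if t ≥ th then k023Loop t tail rest (i + 1) else bill

def calculate_k023_units (time_in_minutes : Int) : Int :=
  -- K023_TIME_THRESHOLDS[0] / [-1]: literal nonempty list, pyGet? never returns none here
  if time_in_minutes < (PySem.List.pyGet? K023_TIME_THRESHOLDS 0).getD 0 then 0
  else
    let last_threshold_units : Int := K023_TIME_THRESHOLDS.length
    let last_threshold_time := (PySem.List.pyGet? K023_TIME_THRESHOLDS (-1)).getD 0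
    let time_past_table := time_in_minutes - last_threshold_time
    -- math.ceil(x / 30.0) = -((-x) // 30); exact: on Dom the float quotient never rounds across an integer
    let additional_units := -(PySem.Int.floordiv (-time_past_table) 30)
    k023Loop time_in_minutes (last_threshold_units + additional_units)
      (PySem.List.enumerate K023_TIME_THRESHOLDS 0) 0

-- ===== PORT B =====
def calculate_k023_units_alt (time_in_minutes : Int) : Int :=
  if time_in_minutes < 20 then 0
  else if time_in_minutes ≤ 226 then 1 + PySem.Int.floordiv (time_in_minutes - 16) 30
  else 8 + (-(PySem.Int.floordiv (-(time_in_minutes - 226)) 30))  -- math.ceil((t-226)/30.0)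

-- ===== PRECONDITION & SPEC =====
def Spec_calculate_k023_units (time_in_minutes : Int) (out : Int) : Prop := out = calculate_k023_units_alt time_in_minutes
instance (time_in_minutes : Int) (out : Int) : Decidable (Spec_calculate_k023_units time_in_minutes out) := by unfold Spec_calculate_k023_units; infer_instance

-- ===== CLAIM (what is proved, stated in full; the proofs are below) =====
def Claim_equal_calculate_k023_units : Prop := ∀ (time_in_minutes : Int), Dom_calculate_k023_units time_in_minutes → Spec_calculate_k023_units time_in_minutes (calculate_k023_units time_in_minutes)

-- ===== LEMMAS AND PROOFS =====

-- ===== VERDICT (by name: the statement is the Claim_ definition above) =====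
theorem calculate_k023_units_spec : Claim_equal_calculate_k023_units := by
  intro t _
  unfold Spec_calculate_k023_units calculate_k023_units calculate_k023_units_alt
  have hdiv : ∀ a : Int, PySem.Int.floordiv a 30 = a / 30 := fun a =>
    PySem.Int.floordiv_eq_ediv_of_pos (by norm_num)
  simp only [K023_TIME_THRESHOLDS, PySem.List.enumerate_cons, PySem.List.enumerate_nil,
    k023Loop, PySem.List.pyGet?, PySem.List.pyIdx?, hdiv]
  norm_num
  split_ifs <;> omega
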